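-- pv_equiv track=rewrite | github.com/c0m1c5an5/codeowners-generator | codeowners/utils.py | escape_glob
-- ===== SOURCE A (Python) =====
-- GLOBCHARS = {" ", "*", "!", "\\", "[", "]"}
--
-- def escape_glob(input: str) -> str:
--     """Escape glob special characters in string.
--
--     Args:
--         input (str): Input string
--
--     Returns:
--         str: Escaped string
--     """
--     escaped_str = ""
--     for char in input:
--         if char in GLOBCHARS:
--             escaped_str += "\\" + char
--         else:
--             escaped_str += char
--     return escaped_str
-- ===== SOURCE B (Python) =====
-- GLOBCHARS = {" ", "*", "!", "\\", "[", "]"}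
--
--
-- def escape_glob(input: str) -> str:
--     """Escape glob special characters by staged whole-string replace passes.
--
--     Backslashes are doubled first, so the backslashes inserted by the later
--     passes (one pass per remaining special character, each a distinct
--     character) are never re-escaped; hence every character is escaped exactly
--     once, same as a single per-character scan.
--     """
--     out = input.replace("\\", "\\\\")
--     for c in " *![]":
--         out = out.replace(c, "\\" + c)
--     return out
-- ===== Notes on version B (the rewrite author's own statement) =====
-- stated objective: faster
-- what changed: A's single per-character loop with if/else on set membership and repeated string concatenation is replaced by staged whole-string passes: backslashes are doubled first, then one C-level str.replace pass per remaining special character; the inserted backslashes are never re-escaped, so the result is identical.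
import Mathlib
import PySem

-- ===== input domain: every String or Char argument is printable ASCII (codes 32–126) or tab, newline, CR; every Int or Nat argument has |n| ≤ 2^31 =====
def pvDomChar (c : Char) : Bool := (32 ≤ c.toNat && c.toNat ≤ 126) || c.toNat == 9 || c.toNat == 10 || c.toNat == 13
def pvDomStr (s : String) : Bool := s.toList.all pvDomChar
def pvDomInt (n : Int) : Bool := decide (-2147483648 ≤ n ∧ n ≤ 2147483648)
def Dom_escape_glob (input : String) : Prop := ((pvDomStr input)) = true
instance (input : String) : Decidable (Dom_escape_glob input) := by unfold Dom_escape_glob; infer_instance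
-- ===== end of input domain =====

-- B replaces A's per-character loop by staged whole-string replace passes
-- (double backslashes first, then one replace pass per remaining special char);
-- return values proved equal.
-- ===== PORT A =====
def GLOBCHARS : PySem.Set Char := PySem.Set.ofList [' ', '*', '!', '\\', '[', ']']

-- A's loop: escaped_str += "\\" + char / escaped_str += char, transcribed on the char list.
def escape_glob (input : String) : String :=
  String.ofList (input.toList.foldl
    (fun acc c => if GLOBCHARS.contains c then acc ++ ['\\', c] else acc ++ [c]) [])

-- ===== PORT B =====
-- out = input.replace("\\", "\\\\"); for c in " *![]": out = out.replace(c, "\\" + c)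
def escape_glob_alt (input : String) : String :=
  (" *![]".toList).foldl
    (fun out c => PySem.Str.replace out (String.ofList [c]) (String.ofList ['\\', c]))
    (PySem.Str.replace input "\\" "\\\\")

-- ===== PRECONDITION & SPEC =====
def Spec_escape_glob (input : String) (out : String) : Prop := out = escape_glob_alt input
instance (input : String) (out : String) : Decidable (Spec_escape_glob input out) := by unfold Spec_escape_glob; infer_instance

-- ===== CLAIM (what is proved, stated in full; the proofs are below) =====
def Claim_equal_escape_glob : Prop := ∀ (input : String), Dom_escape_glob input → Spec_escape_glob input (escape_glob input)

-- ===== LEMMAS AND PROOFS =====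

-- replace with a single-char pattern is a per-character flatMap
lemma go_single (c : Char) (new : List Char) :
    ∀ (l : List Char) (fuel : Nat) (acc : List Char), l.length ≤ fuel →
    PySem.Chars.replace.go [c] new fuel l acc =
      acc.reverse ++ l.flatMap (fun x => if x = c then new else [x]) := by
  intro l
  induction l with
  | nil =>
    intro fuel acc _
    cases fuel <;> simp [PySem.Chars.replace.go]
  | cons x t ih =>
    intro fuel acc hle
    cases fuel with
    | zero => simp at hle
    | succ f =>
      have hle' : t.length ≤ f := by simpa using hle
      by_cases hx : x = c
      · subst hx
        simp [PySem.Chars.replace.go, List.isPrefixOf, ih _ _ hle']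
      · have hcx : (c == x) = false := by simp; exact fun h => hx h.symm
        simp [PySem.Chars.replace.go, List.isPrefixOf, hcx, ih _ _ hle', hx]

lemma replace_single (s : List Char) (c : Char) (new : List Char) :
    PySem.Chars.replace s [c] new = s.flatMap (fun x => if x = c then new else [x]) := by
  simp [PySem.Chars.replace, go_single c new s s.length [] le_rfl]

-- the per-character function A applies
def fA (x : Char) : List Char := if GLOBCHARS.contains x then ['\\', x] else [x]

-- the per-character composition B's six passes amount to
lemma passes_single (x : Char) :
    ((if x = '\\' then ['\\', '\\'] else [x]).flatMap (fun a =>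
      (if a = ' ' then ['\\', ' '] else [a]).flatMap (fun b =>
      (if b = '*' then ['\\', '*'] else [b]).flatMap (fun c =>
      (if c = '!' then ['\\', '!'] else [c]).flatMap (fun d =>
      (if d = '[' then ['\\', '['] else [d]).flatMap (fun e =>
      (if e = ']' then ['\\', ']'] else [e]))))))) = fA x := by
  by_cases h1 : x = ' '
  · subst h1; decide
  by_cases h2 : x = '*'
  · subst h2; decide
  by_cases h3 : x = '!'
  · subst h3; decide
  by_cases h4 : x = '\\'
  · subst h4; decide
  by_cases h5 : x = '['
  · subst h5; decide
  by_cases h6 : x = ']'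
  · subst h6; decide
  have h1' : ¬(' ' = x) := fun h => h1 h.symm
  have h2' : ¬('*' = x) := fun h => h2 h.symm
  have h3' : ¬('!' = x) := fun h => h3 h.symm
  have h4' : ¬('\\' = x) := fun h => h4 h.symm
  have h5' : ¬('[' = x) := fun h => h5 h.symm
  have h6' : ¬(']' = x) := fun h => h6 h.symm
  simp [fA, GLOBCHARS, PySem.Set.ofList, PySem.Set.add, PySem.Set.contains,
    h1, h2, h3, h4, h5, h6]

lemma alt_toList (input : String) :
    (escape_glob_alt input).toList = input.toList.flatMap fA := by
  unfold escape_glob_alt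
  have hs : (" *![]".toList) = [' ', '*', '!', '[', ']'] := by decide
  have hb : ("\\".toList) = ['\\'] := by decide
  have hbs : ("\\\\".toList) = ['\\', '\\'] := by decide
  simp only [hs, List.foldl_cons, List.foldl_nil, PySem.Str.toList_replace,
    String.toList_ofList, hb, hbs, replace_single, List.flatMap_assoc]
  exact List.flatMap_congr (fun x _ => passes_single x)

-- ===== VERDICT (by name: the statement is the Claim_ definition above) =====
theorem escape_glob_spec : Claim_equal_escape_glob := by
  intro input _
  unfold Spec_escape_glob escape_glob
  have hA : input.toList.foldl
      (fun acc c => if GLOBCHARS.contains c then acc ++ ['\\', c] else acc ++ [c]) [] =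
      input.toList.flatMap fA := by
    have hfg := PySem.List.foldl_congr_mem input.toList
      (fun acc c => if GLOBCHARS.contains c then acc ++ ['\\', c] else acc ++ [c])
      (fun acc c => acc ++ fA c) [] (fun acc x _ => by simp only [fA]; split_ifs <;> rfl)
    rw [hfg, PySem.List.foldl_append_eq_flatMap]
    simp
  rw [hA, ← alt_toList]
  exact String.ofList_toList
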